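-- pv_equiv track=rewrite | github.com/DeFiML/DeFiML-AlphaPulse-HFT-Crypto-Bot | HFT-Crypto-Bot/custom_backtesting.py | _calculate_consecutive_wins
-- ===== SOURCE A (Python) =====
-- from typing import Dict, List, Tuple, Optional
--
-- def _calculate_consecutive_wins(trades: List[Dict]) -> int:
--     """Calculate maximum consecutive winning trades"""
--     if not trades:
--         return 0
--
--     max_consecutive = 0
--     current_consecutive = 0
--
--     for trade in trades:
--         if trade['pnl'] > 0:
--             current_consecutive += 1
--             max_consecutive = max(max_consecutive, current_consecutive)
--         else:
--             current_consecutive = 0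
--
--     return max_consecutive
-- ===== SOURCE B (Python) =====
-- def _calculate_consecutive_wins(trades):
--     """Calculate maximum consecutive winning trades (runs-then-reduce)."""
--     wins = [t['pnl'] > 0 for t in trades]
--     runs = []
--     rest = wins
--     while rest:
--         k = rest[0]
--         n = 1
--         while n < len(rest) and rest[n] == k:
--             n += 1
--         runs.append((k, n))
--         rest = rest[n:]
--     return max([n for k, n in runs if k], default=0)
-- ===== Notes on version B (the rewrite author's own statement) =====
-- stated objective: alternative
-- what changed: A's single loop with a reset-on-loss running counter is replaced by a runs-then-reduce decomposition: B first maps trades to win booleans, materializes the maximal runs of equal values as (key, length) pairs, then returns the max length over winning runs with default 0.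
import Mathlib
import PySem

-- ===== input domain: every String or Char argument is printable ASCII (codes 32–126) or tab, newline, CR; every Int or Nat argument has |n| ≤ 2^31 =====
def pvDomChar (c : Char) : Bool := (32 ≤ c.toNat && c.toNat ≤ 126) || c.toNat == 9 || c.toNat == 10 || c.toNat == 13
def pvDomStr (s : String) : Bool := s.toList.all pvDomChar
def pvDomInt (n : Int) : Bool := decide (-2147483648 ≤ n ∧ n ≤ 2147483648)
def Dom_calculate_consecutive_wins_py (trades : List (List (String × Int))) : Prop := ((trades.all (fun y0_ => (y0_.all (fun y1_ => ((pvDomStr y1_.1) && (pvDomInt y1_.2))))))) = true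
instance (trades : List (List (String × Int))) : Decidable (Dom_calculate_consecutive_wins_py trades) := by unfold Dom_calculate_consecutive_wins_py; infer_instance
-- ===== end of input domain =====

-- B replaces A's running-counter-with-reset loop by a runs-then-reduce decomposition
-- (materialize maximal equal-valued runs of the win predicate, then take the max length
-- of the winning runs, default 0); objective: alternative structure, same linear cost.


-- ===== PORT A =====
-- 'if not trades: return 0', then the loop with (max_consecutive, current_consecutive).
-- trade['pnl'] is ported as Dict.getD with default 0; inputs where the key is missing
-- (Python: KeyError) are excluded by Pre_ below.
def calculate_consecutive_wins_py (trades : List (List (String × Int))) : Int :=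
  if trades = [] then 0
  else
    (trades.foldl
      (fun (st : Int × Int) trade =>
        if 0 < PySem.Dict.getD (PySem.Dict.mk trade) "pnl" 0 then
          (max st.1 (st.2 + 1), st.2 + 1)
        else (st.1, 0))
      (0, 0)).1

-- ===== PORT B =====
-- Source B's while-loop materializing runs of equal booleans as (key, run length):
-- n = 1 + length of the prefix of rest[1:] equal to rest[0] = k, and rest = rest[n:]
-- is exactly dropWhile (== k), since the first n elements all equal k.
def pvRuns : List Bool → List (Bool × Int)
  | [] => []
  | k :: rest =>
    (k, 1 + ((rest.takeWhile (· == k)).length : Int)) :: pvRuns (rest.dropWhile (· == k))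
termination_by xs => xs.length
decreasing_by
  simpa using Nat.lt_succ_of_le (List.length_dropWhile_le _ _)

-- max([...], default=0) is PySem.List.maxD
def calculate_consecutive_wins_py_alt (trades : List (List (String × Int))) : Int :=
  let wins := trades.map (fun t => decide (0 < PySem.Dict.getD (PySem.Dict.mk t) "pnl" 0))
  let runs := pvRuns wins
  PySem.List.maxD ((runs.filter (·.1)).map (·.2)) (fun x => x) 0

-- ===== PRECONDITION & SPEC =====
-- Pre_ excludes exactly the trades lacking a "pnl" key, on which Python A raises KeyError.
def Pre_calculate_consecutive_wins_py (trades : List (List (String × Int))) : Prop :=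
  ∀ t ∈ trades, (PySem.Dict.mk t).contains "pnl" = true
instance (trades : List (List (String × Int))) : Decidable (Pre_calculate_consecutive_wins_py trades) := by unfold Pre_calculate_consecutive_wins_py; infer_instance

def pvWitness_calculate_consecutive_wins_py : (List (List (String × Int))) :=
  [[("pnl", 5)], [("pnl", -2)], [("pnl", 1)], [("pnl", 3)]]

def Spec_calculate_consecutive_wins_py (trades : List (List (String × Int))) (out : Int) : Prop := out = calculate_consecutive_wins_py_alt trades
instance (trades : List (List (String × Int))) (out : Int) : Decidable (Spec_calculate_consecutive_wins_py trades out) := by unfold Spec_calculate_consecutive_wins_py; infer_instance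

-- ===== CLAIM (what is proved, stated in full; the proofs are below) =====
def Claim_equal_calculate_consecutive_wins_py : Prop := ∀ (trades : List (List (String × Int))), Dom_calculate_consecutive_wins_py trades → Pre_calculate_consecutive_wins_py trades → Spec_calculate_consecutive_wins_py trades (calculate_consecutive_wins_py trades)

-- ===== LEMMAS AND PROOFS =====

-- A's loop body as a function of the win boolean
def pvStep (st : Int × Int) (b : Bool) : Int × Int :=
  if b then (max st.1 (st.2 + 1), st.2 + 1) else (st.1, 0)

-- the "future peaks" of A's counter: max over all values current_consecutive will reach
def pvK : Int → List Bool → Int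
  | _, [] => 0
  | c, true :: bs => max (c + 1) (pvK (c + 1) bs)
  | _, false :: bs => pvK 0 bs

-- B's value as a function of the win booleans (definitionally B's tail computation)
def pvBv (bs : List Bool) : Int :=
  PySem.List.maxD (((pvRuns bs).filter (·.1)).map (·.2)) (fun x => x) 0

theorem pvDrop_head_false {α} (p : α → Bool) (l : List α) (y : α) (ys : List α)
    (h : l.dropWhile p = y :: ys) : p y = false := by
  have hne : l.dropWhile p ≠ [] := by simp [h]
  have h2 := List.head_dropWhile_not p hne
  simp only [h, List.head_cons] at h2
  exact h2

theorem pvFoldl_max_max (l : List Int) : ∀ (a b : Int),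
    l.foldl max (max a b) = max a (l.foldl max b) := by
  induction l with
  | nil => intro a b; rfl
  | cons x t ih =>
    intro a b
    simpa [List.foldl_cons, max_assoc] using ih a (max b x)

theorem pvMaxD_cons (x : Int) (l : List Int) (hx : 0 ≤ x) :
    PySem.List.maxD (x :: l) (fun y => y) 0 =
      max x (PySem.List.maxD l (fun y => y) 0) := by
  cases l with
  | nil =>
    simp [PySem.List.maxD, PySem.List.max?]
    omega
  | cons y t =>
    have h1 : PySem.List.maxD (x :: y :: t) (fun y => y) 0 = (y :: t).foldl max x := by
      simp [PySem.List.maxD, PySem.List.max?_id_cons]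
    have h2 : PySem.List.maxD (y :: t) (fun y => y) 0 = t.foldl max y := by
      simp [PySem.List.maxD, PySem.List.max?_id_cons]
    have h3 : (y :: t).foldl max x = max x (t.foldl max y) := by
      have := pvFoldl_max_max t x y
      simpa [List.foldl_cons] using this
    rw [h1, h2, h3]

theorem pvBv_nil : pvBv [] = 0 := by
  rw [pvBv, pvRuns]
  rfl

theorem pvBv_cons_true (rest : List Bool) :
    pvBv (true :: rest) =
      max (1 + ((rest.takeWhile (· == true)).length : Int))
        (pvBv (rest.dropWhile (· == true))) := by
  rw [pvBv, pvRuns]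
  simp only [List.filter_cons]
  exact pvMaxD_cons _ _ (by positivity)

theorem pvBv_cons_false (rest : List Bool) :
    pvBv (false :: rest) = pvBv (rest.dropWhile (· == false)) := by
  rw [pvBv, pvRuns]
  simp [pvBv]

theorem pvBv_nonneg : (bs : List Bool) → 0 ≤ pvBv bs
  | [] => by rw [pvBv_nil]
  | true :: rest => by
    rw [pvBv_cons_true]
    have h : (0 : Int) ≤ 1 + ((rest.takeWhile (· == true)).length : Int) := by positivity
    omega
  | false :: rest => by
    rw [pvBv_cons_false]
    exact pvBv_nonneg (rest.dropWhile (· == false))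
termination_by bs => bs.length
decreasing_by
  simpa using Nat.lt_succ_of_le (List.length_dropWhile_le _ _)

-- A's fold from state (m, c): its first component is max m (pvK c bs)
theorem pvFoldA_K (bs : List Bool) : ∀ (m c : Int), 0 ≤ c → c ≤ m →
    (bs.foldl pvStep (m, c)).1 = max m (pvK c bs) := by
  induction bs with
  | nil => intro m c h0 hcm; simp [pvK]; omega
  | cons b t ih =>
    intro m c h0 hcm
    cases b with
    | true =>
      have hst : pvStep (m, c) true = (max m (c + 1), c + 1) := rfl
      rw [List.foldl_cons, hst, ih (max m (c + 1)) (c + 1) (by omega) (by omega), pvK]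
      omega
    | false =>
      have hst : pvStep (m, c) false = (m, 0) := rfl
      rw [List.foldl_cons, hst, ih m 0 (by omega) (by omega), pvK]

theorem pvK_true_run (t : List Bool) : ∀ (c : Int) (r : List Bool),
    (∀ y ∈ t, y = true) →
    pvK c (true :: (t ++ r)) = max (c + 1 + (t.length : Int)) (pvK (c + 1 + (t.length : Int)) r) := by
  induction t with
  | nil => intro c r _; simp [pvK]
  | cons y t' ih =>
    intro c r hall
    have hy : y = true := hall y (by simp)
    subst hy
    have h' : ∀ y ∈ t', y = true := fun y hy => hall y (by simp [hy])
    have hE : c + 1 + ((t'.length : Int) + 1) = c + 1 + 1 + (t'.length : Int) := by ring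
    rw [show (true :: (true :: t' ++ r)) = true :: (true :: (t' ++ r)) from rfl, pvK,
      ih (c + 1) r h']
    simp only [List.length_cons]
    push_cast
    rw [hE]
    omega

theorem pvK_false_run (t : List Bool) : ∀ (c : Int) (r : List Bool),
    (∀ y ∈ t, y = false) →
    pvK c (false :: (t ++ r)) = pvK 0 r := by
  induction t with
  | nil => intro c r _; rfl
  | cons y t' ih =>
    intro c r hall
    have hy : y = false := hall y (by simp)
    subst hy
    have h' : ∀ y ∈ t', y = false := fun y hy => hall y (by simp [hy])
    rw [show (false :: (false :: t' ++ r)) = false :: (false :: (t' ++ r)) from rfl, pvK,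
      ih 0 r h']

-- main characterisation: pvK c equals B's runs-based value
-- (plus the still-live winning prefix when the list starts with a win)
theorem pvK_eq_Bv : (bs : List Bool) → ∀ (c : Int), 0 ≤ c →
    pvK c bs =
      (match bs with
       | true :: rest =>
         max (c + 1 + ((rest.takeWhile (· == true)).length : Int)) (pvBv (true :: rest))
       | _ => pvBv bs)
  | [] => by
    intro c hc
    show pvK c [] = pvBv []
    rw [pvBv_nil]; rfl
  | true :: rest => by
    intro c hc
    show pvK c (true :: rest) =
      max (c + 1 + ((rest.takeWhile (· == true)).length : Int)) (pvBv (true :: rest))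
    have hall : ∀ y ∈ rest.takeWhile (· == true), y = true := by
      intro y hy
      simpa using List.mem_takeWhile_imp hy
    have h1 := pvK_true_run (rest.takeWhile (· == true)) c (rest.dropWhile (· == true)) hall
    rw [List.takeWhile_append_dropWhile] at h1
    rw [h1, pvBv_cons_true]
    cases hd : rest.dropWhile (· == true) with
    | nil =>
      rw [pvBv_nil,
        show pvK (c + 1 + ((rest.takeWhile (· == true)).length : Int)) ([] : List Bool) = 0
          from rfl]
      omega
    | cons y ys =>
      have hy : y = false := by
        have := pvDrop_head_false (· == true) rest y ys hd
        simpa using this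
      subst hy
      have hih : pvK (c + 1 + ((rest.takeWhile (· == true)).length : Int)) (false :: ys) =
          pvBv (false :: ys) :=
        pvK_eq_Bv (false :: ys) (c + 1 + ((rest.takeWhile (· == true)).length : Int))
          (by positivity)
      rw [hih]
      omega
  | false :: rest => by
    intro c hc
    show pvK c (false :: rest) = pvBv (false :: rest)
    have hall : ∀ y ∈ rest.takeWhile (· == false), y = false := by
      intro y hy
      simpa using List.mem_takeWhile_imp hy
    have h1 := pvK_false_run (rest.takeWhile (· == false)) c (rest.dropWhile (· == false)) hall
    rw [List.takeWhile_append_dropWhile] at h1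
    rw [h1, pvBv_cons_false]
    cases hd : rest.dropWhile (· == false) with
    | nil =>
      rw [pvBv_nil]; rfl
    | cons y ys =>
      have hy : y = true := by
        have := pvDrop_head_false (· == false) rest y ys hd
        simpa using this
      subst hy
      have hih : pvK 0 (true :: ys) =
          max ((0 : Int) + 1 + ((ys.takeWhile (· == true)).length : Int)) (pvBv (true :: ys)) :=
        pvK_eq_Bv (true :: ys) 0 le_rfl
      rw [hih, pvBv_cons_true]
      omega
termination_by bs => bs.length
decreasing_by
  · have hlen := congrArg List.length hd
    have h2 := List.length_dropWhile_le (· == true) rest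
    simp only [List.length_cons] at *
    omega
  · have hlen := congrArg List.length hd
    have h2 := List.length_dropWhile_le (· == false) rest
    simp only [List.length_cons] at *
    omega

theorem pvK_zero_eq_Bv (bs : List Bool) : pvK 0 bs = pvBv bs := by
  cases bs with
  | nil => rw [pvBv_nil]; rfl
  | cons b rest =>
    cases b with
    | false => exact pvK_eq_Bv (false :: rest) 0 le_rfl
    | true =>
      have h : pvK 0 (true :: rest) =
          max ((0 : Int) + 1 + ((rest.takeWhile (· == true)).length : Int)) (pvBv (true :: rest)) :=
        pvK_eq_Bv (true :: rest) 0 le_rfl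
      rw [h, pvBv_cons_true]
      omega

theorem pvStep_ite (a b z : Int) :
    (if 0 < z then (max a (b + 1), b + 1) else (a, 0)) = pvStep (a, b) (decide (0 < z)) := by
  by_cases hp : 0 < z <;> simp [pvStep, hp]

-- ===== VERDICT (by name: the statement is the Claim_ definition above) =====
theorem calculate_consecutive_wins_py_spec : Claim_equal_calculate_consecutive_wins_py := by
  intro trades _ _
  unfold Spec_calculate_consecutive_wins_py
  have halt : calculate_consecutive_wins_py_alt trades =
      pvBv (trades.map (fun t => decide (0 < PySem.Dict.getD (PySem.Dict.mk t) "pnl" 0))) := rfl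
  rw [calculate_consecutive_wins_py, halt]
  by_cases h : trades = []
  · subst h
    rw [if_pos rfl, List.map_nil, pvBv_nil]
  · rw [if_neg h]
    simp only [pvStep_ite, Prod.mk.eta]
    rw [← List.foldl_map, pvFoldA_K _ 0 0 le_rfl le_rfl, pvK_zero_eq_Bv]
    have := pvBv_nonneg (trades.map (fun t => decide (0 < PySem.Dict.getD (PySem.Dict.mk t) "pnl" 0)))
    omega
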